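-- pv_equiv track=rewrite | github.com/y0-x-0y/sts2-commander | overlay/display.py | _number_enemies
-- ===== SOURCE A (Python) =====
-- def _number_enemies(enemies):
--     """Give same-name enemies numbers: 绿虱#1, 绿虱#2."""
--     name_count = {}
--     for e in enemies:
--         n = e.get("name", "?")
--         name_count[n] = name_count.get(n, 0) + 1
--     name_idx = {}
--     for e in enemies:
--         n = e.get("name", "?")
--         if name_count[n] > 1:
--             name_idx[n] = name_idx.get(n, 0) + 1
--             e["_display_name"] = f"{n}#{name_idx[n]}"
--         else:
--             e["_display_name"] = n
--     return enemies
-- ===== SOURCE B (Python) =====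
-- def _number_enemies(enemies):
--     """Give same-name enemies numbers: 绿虱#1, 绿虱#2."""
--     groups = {}
--     for e in enemies:
--         groups.setdefault(e.get("name", "?"), []).append(e)
--     for name, members in groups.items():
--         if len(members) == 1:
--             members[0]["_display_name"] = name
--         else:
--             for i, m in enumerate(members, 1):
--                 m["_display_name"] = f"{name}#{i}"
--     return enemies
-- ===== Notes on version B (the rewrite author's own statement) =====
-- stated objective: alternative
-- what changed: Instead of two flat counting passes with running counter dicts, B groups the enemies into an ordered name->members dict in one pass and then assigns display names group by group (plain name for singleton groups, name#i by enumerating each multi-member group).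
import Mathlib
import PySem

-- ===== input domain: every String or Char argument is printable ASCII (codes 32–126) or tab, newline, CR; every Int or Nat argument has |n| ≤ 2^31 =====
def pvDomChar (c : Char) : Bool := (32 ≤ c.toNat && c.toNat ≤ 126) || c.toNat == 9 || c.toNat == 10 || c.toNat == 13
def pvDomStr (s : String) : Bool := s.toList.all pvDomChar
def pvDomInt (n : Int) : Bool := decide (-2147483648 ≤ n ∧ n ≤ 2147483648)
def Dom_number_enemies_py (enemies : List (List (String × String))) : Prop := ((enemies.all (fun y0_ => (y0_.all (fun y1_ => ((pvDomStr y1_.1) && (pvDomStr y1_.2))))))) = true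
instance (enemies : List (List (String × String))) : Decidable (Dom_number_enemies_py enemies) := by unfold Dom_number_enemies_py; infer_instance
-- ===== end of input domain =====

-- B replaces A's two flat counting passes (running counter dicts) with a grouping pass building an
-- ordered name -> members dict, then assigns display names group by group (objective: alternative).
-- Both Pythons mutate the enemy dicts in place and return the same list object; the equivalence
-- proved here is about the return value (in B's port the in-place assignment to a member is
-- modeled by keying each enemy by its position in the list).

-- ===== PORT A =====
def number_enemies_py (enemies : List (List (String × String))) : List (List (String × String)) :=
  let name_count := enemies.foldl (fun d e =>
      let n := (PySem.Dict.mk e).getD "name" "?"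
      d.insert n (d.getD n 0 + 1)) (PySem.Dict.empty : PySem.Dict String Int)
  let res := enemies.foldl
      (fun (st : PySem.Dict String Int × List (List (String × String))) e =>
        let n := (PySem.Dict.mk e).getD "name" "?"
        if 1 < name_count.getD n 0 then
          let d' := st.1.insert n (st.1.getD n 0 + 1)
          (d', st.2 ++ [((PySem.Dict.mk e).insert "_display_name"
                          (n ++ "#" ++ PySem.Int.toStr (d'.getD n 0))).items])
        else
          (st.1, st.2 ++ [((PySem.Dict.mk e).insert "_display_name" n).items]))
      ((PySem.Dict.empty : PySem.Dict String Int), ([] : List (List (String × String))))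
  res.2

-- ===== PORT B =====
def number_enemies_py_alt (enemies : List (List (String × String))) : List (List (String × String)) :=
  -- groups: name -> list of members in encounter order (members carried with their position)
  let groups : PySem.Dict String (List (Int × List (String × String))) :=
    (PySem.List.enumerate enemies).foldl
      (fun g p => g.modify ((PySem.Dict.mk p.2).getD "name" "?") [] (· ++ [p]))
      PySem.Dict.empty
  -- per-group assignment of display names (position -> updated enemy dict)
  let assign : PySem.Dict Int (List (String × String)) :=
    groups.items.foldl
      (fun a q =>
        if q.2.length == 1 then
          a.insert (q.2.headD (0, [])).1
            ((PySem.Dict.mk (q.2.headD (0, [])).2).insert "_display_name" q.1).items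
        else
          (PySem.List.enumerate q.2 1).foldl
            (fun a r =>
              a.insert r.2.1
                ((PySem.Dict.mk r.2.2).insert "_display_name"
                  (q.1 ++ "#" ++ PySem.Int.toStr r.1)).items)
            a)
      PySem.Dict.empty
  -- return enemies (each enemy in its original slot, as mutated by its group's assignment)
  (PySem.List.enumerate enemies).map (fun p => assign.getD p.1 p.2)

-- ===== PRECONDITION & SPEC =====
def Spec_number_enemies_py (enemies : List (List (String × String))) (out : List (List (String × String))) : Prop := out = number_enemies_py_alt enemies
instance (enemies : List (List (String × String))) (out : List (List (String × String))) : Decidable (Spec_number_enemies_py enemies out) := by unfold Spec_number_enemies_py; infer_instance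

-- ===== CLAIM =====
def Claim_equal_number_enemies_py : Prop := ∀ (enemies : List (List (String × String))), Dom_number_enemies_py enemies → Spec_number_enemies_py enemies (number_enemies_py enemies)

-- ===== LEMMAS AND PROOFS =====

-- the name read by both ports
def pvName (e : List (String × String)) : String := (PySem.Dict.mk e).getD "name" "?"

-- the per-element closed form both ports are reduced to:
-- name if unique, else name#(count in prefix + 1)
def pvBodyB (N : List String) (p : Int × List (String × String)) : List (String × String) :=
  if 1 < N.count (PySem.List.pyGetD N p.1 "?") then
    ((PySem.Dict.mk p.2).insert "_display_name"
      (PySem.List.pyGetD N p.1 "?" ++ "#" ++ PySem.Int.toStr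
        (((PySem.List.slice N none (some p.1)).count (PySem.List.pyGetD N p.1 "?") : Int) + 1))).items
  else
    ((PySem.Dict.mk p.2).insert "_display_name" (PySem.List.pyGetD N p.1 "?")).items

-- ---------- A side (loop with running counters = closed form) ----------

-- A's second-pass loop body, with name_count lookups already rewritten to counts in N
def pvStepA (N : List String) (st : PySem.Dict String Int × List (List (String × String)))
    (e : List (String × String)) : PySem.Dict String Int × List (List (String × String)) :=
  if 1 < (N.count (pvName e) : Int) then
    (st.1.insert (pvName e) (st.1.getD (pvName e) 0 + 1),
     st.2 ++ [((PySem.Dict.mk e).insert "_display_name"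
                (pvName e ++ "#" ++ PySem.Int.toStr
                  ((st.1.insert (pvName e) (st.1.getD (pvName e) 0 + 1)).getD (pvName e) 0))).items])
  else
    (st.1, st.2 ++ [((PySem.Dict.mk e).insert "_display_name" (pvName e)).items])

lemma pv_getD_mid (xs ys : List String) (y : String) :
    (xs ++ y :: ys).getD xs.length "?" = y := by
  induction xs with
  | nil => simp
  | cons x xs ih => simpa using ih

lemma pv_loop_eq (N : List String) (suf : List (List (String × String))) :
    ∀ (pre : List (List (String × String))) (d : PySem.Dict String Int)
      (acc : List (List (String × String))),
    N = (pre ++ suf).map pvName →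
    (∀ m, 1 < N.count m → d.getD m 0 = ((pre.map pvName).count m : Int)) →
    (suf.foldl (pvStepA N) (d, acc)).2
      = acc ++ (PySem.List.enumerate suf (pre.length : Int)).map (pvBodyB N) := by
  induction suf with
  | nil => intro pre d acc _ _; simp [PySem.List.enumerate_nil]
  | cons e rest ih =>
    intro pre d acc hN hd
    have hname : PySem.List.pyGetD N ((pre.length : Int)) "?" = pvName e := by
      rw [PySem.List.pyGetD_natCast]
      have hsplit : N = pre.map pvName ++ pvName e :: rest.map pvName := by simpa using hN
      rw [hsplit]
      have := pv_getD_mid (pre.map pvName) (rest.map pvName) (pvName e)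
      simpa using this
    have hslice : PySem.List.slice N none (some (pre.length : Int)) = pre.map pvName := by
      rw [PySem.List.slice_to_natCast]
      have hsplit : N = pre.map pvName ++ pvName e :: rest.map pvName := by simpa using hN
      rw [hsplit]
      simpa using List.take_left (pre.map pvName) (l₂ := pvName e :: rest.map pvName)
    have hN' : N = ((pre ++ [e]) ++ rest).map pvName := by simpa using hN
    have hlen : (((pre ++ [e]).length : Nat) : Int) = (pre.length : Int) + 1 := by
      push_cast [List.length_append, List.length_cons, List.length_nil]; ring
    rw [PySem.List.enumerate_cons, List.map_cons, List.foldl_cons]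
    by_cases hc : 1 < ((N.count (pvName e) : Nat) : Int)
    · have hcN : 1 < N.count (pvName e) := by exact_mod_cast hc
      have hdn : d.getD (pvName e) 0 = (((pre.map pvName).count (pvName e) : Nat) : Int) :=
        hd _ hcN
      have hA : pvStepA N (d, acc) e
          = (d.insert (pvName e) (d.getD (pvName e) 0 + 1),
             acc ++ [((PySem.Dict.mk e).insert "_display_name"
               (pvName e ++ "#" ++
                 PySem.Int.toStr ((((pre.map pvName).count (pvName e) : Nat) : Int) + 1))).items]) := by
        unfold pvStepA
        rw [if_pos hc]
        rw [PySem.Dict.getD_insert_self, hdn]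
      have hB : pvBodyB N ((pre.length : Int), e)
          = ((PySem.Dict.mk e).insert "_display_name"
              (pvName e ++ "#" ++
                PySem.Int.toStr ((((pre.map pvName).count (pvName e) : Nat) : Int) + 1))).items := by
        unfold pvBodyB
        rw [hname, if_pos hcN, hslice]
      have hd' : ∀ m, 1 < N.count m →
          (d.insert (pvName e) (d.getD (pvName e) 0 + 1)).getD m 0
            = ((((pre ++ [e]).map pvName).count m : Nat) : Int) := by
        intro m hm
        rw [PySem.Dict.getD_insert]
        by_cases hme : m = pvName e
        · subst hme
          rw [if_pos rfl, hdn]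
          simp [List.map_append, List.count_append]
        · rw [if_neg hme, hd m hm]
          have hbe : (pvName e == m) = false := by
            simp only [beq_eq_false_iff_ne]; exact fun h => hme h.symm
          simp [List.map_append, List.count_append, List.count_singleton, hbe]
      rw [hA, ih (pre ++ [e]) _ _ hN' hd', hlen, hB]
      simp
    · have hcN : ¬ 1 < N.count (pvName e) := by
        intro h; exact hc (by exact_mod_cast h)
      have hA : pvStepA N (d, acc) e
          = (d, acc ++ [((PySem.Dict.mk e).insert "_display_name" (pvName e)).items]) := by
        unfold pvStepA
        rw [if_neg hc]
      have hB : pvBodyB N ((pre.length : Int), e)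
          = ((PySem.Dict.mk e).insert "_display_name" (pvName e)).items := by
        unfold pvBodyB
        rw [hname, if_neg hcN]
      have hd' : ∀ m, 1 < N.count m →
          d.getD m 0 = ((((pre ++ [e]).map pvName).count m : Nat) : Int) := by
        intro m hm
        have hme : m ≠ pvName e := by
          intro h; subst h; exact hcN hm
        rw [hd m hm]
        have hbe : (pvName e == m) = false := by
          simp only [beq_eq_false_iff_ne]; exact fun h => hme h.symm
        simp [List.map_append, List.count_append, List.count_singleton, hbe]
      rw [hA, ih (pre ++ [e]) _ _ hN' hd', hlen, hB]
      simp

lemma pv_name_count (enemies : List (List (String × String))) (n : String) :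
    (enemies.foldl (fun d e =>
        d.insert (pvName e) (d.getD (pvName e) 0 + 1))
      (PySem.Dict.empty : PySem.Dict String Int)).getD n 0
    = ((enemies.map pvName).count n : Int) := by
  have h : enemies.foldl (fun d e => d.insert (pvName e) (d.getD (pvName e) 0 + 1))
        (PySem.Dict.empty : PySem.Dict String Int)
      = (enemies.map pvName).foldl (fun d x => d.insert x (d.getD x 0 + 1))
        (PySem.Dict.empty : PySem.Dict String Int) := by
    rw [List.foldl_map]
  rw [h, PySem.Dict.getD_foldl_insert_add_one]
  simp

lemma pv_A_eq (enemies : List (List (String × String))) :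
    number_enemies_py enemies
      = (PySem.List.enumerate enemies).map (pvBodyB (enemies.map pvName)) := by
  have hpv : ∀ e : List (String × String),
      (PySem.Dict.mk e).getD "name" "?" = pvName e := fun _ => rfl
  have hgen := pv_loop_eq (enemies.map pvName) enemies []
    (PySem.Dict.empty : PySem.Dict String Int) [] (by simp) (by intro m _; simp)
  simp only [List.length_nil, Nat.cast_zero, List.nil_append] at hgen
  simp only [number_enemies_py, hpv, pv_name_count]
  exact hgen

-- ---------- B side (group-then-assign = closed form) ----------

def pvGroups (enemies : List (List (String × String))) :
    PySem.Dict String (List (Int × List (String × String))) :=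
  (PySem.List.enumerate enemies).foldl
    (fun g p => g.modify (pvName p.2) [] (· ++ [p])) PySem.Dict.empty

def pvStepB (a : PySem.Dict Int (List (String × String)))
    (q : String × List (Int × List (String × String))) :
    PySem.Dict Int (List (String × String)) :=
  if q.2.length == 1 then
    a.insert (q.2.headD (0, [])).1
      ((PySem.Dict.mk (q.2.headD (0, [])).2).insert "_display_name" q.1).items
  else
    (PySem.List.enumerate q.2 1).foldl
      (fun a r =>
        a.insert r.2.1
          ((PySem.Dict.mk r.2.2).insert "_display_name"
            (q.1 ++ "#" ++ PySem.Int.toStr r.1)).items)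
      a

def pvAssign (enemies : List (List (String × String))) :
    PySem.Dict Int (List (String × String)) :=
  (pvGroups enemies).items.foldl pvStepB PySem.Dict.empty

lemma pv_alt_unfold (enemies : List (List (String × String))) :
    number_enemies_py_alt enemies
      = (PySem.List.enumerate enemies).map (fun p => (pvAssign enemies).getD p.1 p.2) := rfl

lemma pv_groups_getD (enemies : List (List (String × String))) (c : String) :
    (pvGroups enemies).getD c []
      = (PySem.List.enumerate enemies).filter (fun p => pvName p.2 == c) := by
  unfold pvGroups
  rw [show (PySem.List.enumerate enemies).foldl
      (fun g p => g.modify (pvName p.2) [] (· ++ [p])) PySem.Dict.empty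
    = ((PySem.List.enumerate enemies).map (fun p => (pvName p.2, p))).foldl
      (fun g q => g.modify q.1 [] (· ++ [q.2])) PySem.Dict.empty from by rw [List.foldl_map]]
  rw [PySem.Dict.getD_foldl_modify_append]
  simp [List.filter_map, Function.comp_def]

lemma pv_groups_keys (enemies : List (List (String × String))) :
    (pvGroups enemies).keys = PySem.Set.ofList (enemies.map pvName) := by
  unfold pvGroups
  rw [PySem.Dict.keys_foldl_modify_key]
  rw [show List.map (fun p => pvName p.2) (PySem.List.enumerate enemies)
      = List.map pvName enemies from by
    rw [show (fun (p : Int × List (String × String)) => pvName p.2)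
        = pvName ∘ (fun p => p.2) from rfl, ← List.map_map, PySem.List.map_snd_enumerate]]
  simp [PySem.Set.update_nil_left]

lemma pv_groups_nodup (enemies : List (List (String × String))) :
    (pvGroups enemies).keys.Nodup := by
  unfold pvGroups
  exact PySem.Dict.nodup_keys_foldl_modify_key _ _ _ _ _ (by simp)

-- skip lemma for the inner insert fold
lemma pv_fold_ins_skip {β V : Type} (val : Int × (Int × β) → V) (i : Int) :
    ∀ (m : List (Int × β)) (s : Int) (a : PySem.Dict Int V),
    i ∉ m.map (·.1) →
    ((PySem.List.enumerate m s).foldl (fun a r => a.insert r.2.1 (val r)) a).get? i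
      = a.get? i := by
  intro m
  induction m with
  | nil => intro s a _; simp [PySem.List.enumerate_nil]
  | cons x xs ih =>
    intro s a h
    simp only [List.map_cons, List.mem_cons, not_or] at h
    rw [PySem.List.enumerate_cons, List.foldl_cons]
    rw [ih (s+1) _ (by simpa using h.2)]
    exact PySem.Dict.get?_insert_of_ne _ _ h.1

-- hit lemma for the inner insert fold
lemma pv_fold_ins_hit {β V : Type} (val : Int × (Int × β) → V)
    (m1 m2 : List (Int × β)) (i : Int) (x : β) (s : Int) (a : PySem.Dict Int V)
    (h : i ∉ m2.map (·.1)) :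
    ((PySem.List.enumerate (m1 ++ (i, x) :: m2) s).foldl
        (fun a r => a.insert r.2.1 (val r)) a).get? i
      = some (val (s + m1.length, (i, x))) := by
  rw [PySem.List.enumerate_append, List.foldl_append, PySem.List.enumerate_cons,
    List.foldl_cons]
  rw [pv_fold_ins_skip val i m2 _ _ h]
  exact PySem.Dict.get?_insert_self ..

lemma pv_stepB_skip (a : PySem.Dict Int (List (String × String)))
    (q : String × List (Int × List (String × String))) (i : Int)
    (h : i ∉ q.2.map (·.1)) : (pvStepB a q).get? i = a.get? i := by
  unfold pvStepB
  by_cases hq : q.2.length = 1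
  · obtain ⟨m', hm'⟩ := List.length_eq_one_iff.1 hq
    rw [if_pos (by simp [hq])]
    apply PySem.Dict.get?_insert_of_ne
    intro hi
    apply h
    rw [hm', hi]
    simp [hm']
  · rw [if_neg (by simpa using hq)]
    exact pv_fold_ins_skip _ i q.2 1 a h

-- length of a name-filtered enumerate
lemma pv_filter_enum_len {α : Type} (g : α → Bool) :
    ∀ (l : List α) (s : Int),
    ((PySem.List.enumerate l s).filter (fun p => g p.2)).length = l.countP g := by
  intro l
  induction l with
  | nil => intro s; simp [PySem.List.enumerate_nil]
  | cons x xs ih =>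
    intro s
    rw [PySem.List.enumerate_cons, List.filter_cons, List.countP_cons]
    by_cases hg : g x <;> simp [hg, ih (s+1)]

-- keys of later groups never contain position k when their name differs
lemma pv_filter_fst (enemies : List (List (String × String))) (k : Nat)
    (hk : k < enemies.length) (c : String)
    (hc : ((k : Int)) ∈ ((PySem.List.enumerate enemies).filter
        (fun p => pvName p.2 == c)).map (·.1)) :
    c = pvName enemies[k] := by
  simp only [List.mem_map] at hc
  obtain ⟨p, hpf, hp1⟩ := hc
  have hpe := List.mem_of_mem_filter hpf
  have hpred := List.of_mem_filter hpf
  rcases (PySem.List.mem_enumerate_iff _ _ _).1 hpe with ⟨j, hj, hpj⟩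
  subst hpj
  simp only [zero_add] at hp1 hpred
  have hjk : j = k := by exact_mod_cast hp1
  subst hjk
  exact (eq_of_beq hpred).symm

-- skip lemma at the items level
lemma pv_items_skip (i : Int) (f : String → String × List (Int × List (String × String))) :
    ∀ (cs : List String) (a : PySem.Dict Int (List (String × String))),
    (∀ c ∈ cs, i ∉ (f c).2.map (·.1)) →
    ((cs.map f).foldl pvStepB a).get? i = a.get? i := by
  intro cs
  induction cs with
  | nil => intro a _; simp
  | cons c cs ih =>
    intro a h
    rw [List.map_cons, List.foldl_cons, ih _ (fun c' hc' => h c' (.tail _ hc')),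
      pv_stepB_skip _ _ _ (h c (.head _))]

-- the per-position value of the assignment dict is the closed form
lemma pv_assign_getD (enemies : List (List (String × String))) (k : Nat)
    (hk : k < enemies.length) :
    (pvAssign enemies).getD (k : Int) enemies[k]
      = pvBodyB (enemies.map pvName) ((k : Int), enemies[k]) := by
  have hNlen : (enemies.map pvName).length = enemies.length := by simp
  have hNk : (enemies.map pvName)[k]'(by omega) = pvName enemies[k] := by simp
  -- n is a key of the group dict
  have hmem : pvName enemies[k] ∈ (pvGroups enemies).keys := by
    rw [pv_groups_keys]
    have hmN : pvName enemies[k] ∈ enemies.map pvName := by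
      rw [← hNk]; exact List.getElem_mem _
    simpa [PySem.Set.mem_ofList] using hmN
  obtain ⟨K1, K2, hK⟩ := List.append_of_mem hmem
  have hnd : ((pvGroups enemies).keys).Nodup := pv_groups_nodup enemies
  have hndK : (K1 ++ pvName enemies[k] :: K2).Nodup := by rw [← hK]; exact hnd
  have hK2 : pvName enemies[k] ∉ K2 :=
    (List.nodup_cons.1 (List.nodup_append.1 hndK).2.1).1
  have hitems : (pvGroups enemies).items
      = (K1 ++ pvName enemies[k] :: K2).map
          (fun c => (c, (pvGroups enemies).getD c [])) := by
    rw [← hK]; exact PySem.Dict.items_eq_map_keys _ hnd []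
  -- skip the groups after n
  have hget : (pvAssign enemies).get? (k : Int)
      = (pvStepB ((K1.map (fun c => (c, (pvGroups enemies).getD c []))).foldl
            pvStepB PySem.Dict.empty)
          (pvName enemies[k], (pvGroups enemies).getD (pvName enemies[k]) [])).get? (k : Int) := by
    unfold pvAssign
    rw [hitems, List.map_append, List.map_cons, List.foldl_append, List.foldl_cons]
    apply pv_items_skip
    intro c hc hcontra
    rw [pv_groups_getD] at hcontra
    have hcn : c = pvName enemies[k] := pv_filter_fst enemies k hk c hcontra
    exact hK2 (hcn ▸ hc)
  -- decompose the group of n around position k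
  have hsplit : enemies = enemies.take k ++ enemies[k] :: enemies.drop (k + 1) := by
    rw [List.getElem_cons_drop, List.take_append_drop]
  have htklen : (enemies.take k).length = k := by
    rw [List.length_take]; omega
  have hGdec : (pvGroups enemies).getD (pvName enemies[k]) []
      = ((PySem.List.enumerate (enemies.take k) 0).filter
            (fun p => pvName p.2 == pvName enemies[k]))
        ++ ((k : Int), enemies[k])
          :: ((PySem.List.enumerate (enemies.drop (k + 1)) ((k : Int) + 1)).filter
                (fun p => pvName p.2 == pvName enemies[k])) := by
    rw [pv_groups_getD]
    rw [show PySem.List.enumerate enemies 0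
        = PySem.List.enumerate (enemies.take k ++ enemies[k] :: enemies.drop (k + 1)) 0 from by
      rw [← hsplit]]
    rw [PySem.List.enumerate_append, PySem.List.enumerate_cons, List.filter_append,
      List.filter_cons, htklen]
    simp
  have hF1len : ((PySem.List.enumerate (enemies.take k) 0).filter
        (fun p => pvName p.2 == pvName enemies[k])).length
      = ((enemies.map pvName).take k).count (pvName enemies[k]) := by
    rw [pv_filter_enum_len (fun x => pvName x == pvName enemies[k])]
    rw [← List.map_take, List.count_eq_countP, List.countP_map]
    rfl
  have hGlen : ((pvGroups enemies).getD (pvName enemies[k]) []).length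
      = (enemies.map pvName).count (pvName enemies[k]) := by
    rw [pv_groups_getD]
    rw [pv_filter_enum_len (fun x => pvName x == pvName enemies[k])]
    rw [List.count_eq_countP, List.countP_map]
    rfl
  have hpg : PySem.List.pyGetD (enemies.map pvName) ((k : Int)) "?" = pvName enemies[k] := by
    rw [PySem.List.pyGetD_natCast]
    rw [List.getD_eq_getElem _ _ (by simpa using hk)]
    simp
  have hF2skip : ((k : Int)) ∉ ((PySem.List.enumerate (enemies.drop (k + 1)) ((k : Int) + 1)).filter
        (fun p => pvName p.2 == pvName enemies[k])).map (·.1) := by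
    intro hcontra
    simp only [List.mem_map] at hcontra
    obtain ⟨p, hpf, hp1⟩ := hcontra
    have hpe := List.mem_of_mem_filter hpf
    rcases (PySem.List.mem_enumerate_iff _ _ _).1 hpe with ⟨j, hj, hpj⟩
    subst hpj
    simp only at hp1
    omega
  rw [PySem.Dict.getD_eq_get?_getD, hget]
  by_cases hc1 : (enemies.map pvName).count (pvName enemies[k]) = 1
  · -- singleton group: both sides assign the bare name
    have hGlen1 : ((pvGroups enemies).getD (pvName enemies[k]) []).length = 1 :=
      hGlen.trans hc1
    have hF10 : ((PySem.List.enumerate (enemies.take k) 0).filter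
        (fun p => pvName p.2 == pvName enemies[k])) = [] := by
      rw [← List.length_eq_zero_iff]
      rw [hGdec] at hGlen1
      simp only [List.length_append, List.length_cons] at hGlen1
      omega
    have hF20 : ((PySem.List.enumerate (enemies.drop (k + 1)) ((k : Int) + 1)).filter
        (fun p => pvName p.2 == pvName enemies[k])) = [] := by
      rw [← List.length_eq_zero_iff]
      rw [hGdec] at hGlen1
      simp only [List.length_append, List.length_cons] at hGlen1
      omega
    have hGsing : (pvGroups enemies).getD (pvName enemies[k]) []
        = [((k : Int), enemies[k])] := by
      rw [hGdec, hF10, hF20]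
      rfl
    rw [show (pvStepB ((K1.map (fun c => (c, (pvGroups enemies).getD c []))).foldl
            pvStepB PySem.Dict.empty)
          (pvName enemies[k], (pvGroups enemies).getD (pvName enemies[k]) [])).get? ((k : Int))
        = some (((PySem.Dict.mk enemies[k]).insert "_display_name" (pvName enemies[k])).items) from by
      unfold pvStepB
      rw [hGsing]
      simp [PySem.Dict.get?_insert_self]]
    unfold pvBodyB
    rw [hpg, if_neg (by rw [hc1]; omega)]
    rfl
  · -- shared name: both sides assign name#(prefix count + 1)
    have hcpos : 0 < (enemies.map pvName).count (pvName enemies[k]) := by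
      apply List.count_pos_iff.2
      rw [← hNk]; exact List.getElem_mem _
    have hc : 1 < (enemies.map pvName).count (pvName enemies[k]) := by omega
    have hbfalse : (((pvGroups enemies).getD (pvName enemies[k]) []).length == 1) = false := by
      rw [beq_eq_false_iff_ne, hGlen]; exact hc1
    rw [show (pvStepB ((K1.map (fun c => (c, (pvGroups enemies).getD c []))).foldl
            pvStepB PySem.Dict.empty)
          (pvName enemies[k], (pvGroups enemies).getD (pvName enemies[k]) [])).get? ((k : Int))
        = some (((PySem.Dict.mk enemies[k]).insert "_display_name"
            (pvName enemies[k] ++ "#" ++ PySem.Int.toStr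
              (1 + (((PySem.List.enumerate (enemies.take k) 0).filter
                  (fun p => pvName p.2 == pvName enemies[k])).length : Int)))).items) from by
      unfold pvStepB
      rw [if_neg (by rw [hbfalse]; exact Bool.false_ne_true)]
      rw [hGdec]
      exact pv_fold_ins_hit
        (fun r => ((PySem.Dict.mk r.2.2).insert "_display_name"
          (pvName enemies[k] ++ "#" ++ PySem.Int.toStr r.1)).items)
        _ _ _ _ 1 _ hF2skip]
    unfold pvBodyB
    rw [hpg, if_pos hc, PySem.List.slice_to_natCast]
    rw [hF1len]
    rw [show (1 : Int) + ((((enemies.map pvName).take k).count (pvName enemies[k]) : Nat) : Int)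
        = ((((enemies.map pvName).take k).count (pvName enemies[k]) : Nat) : Int) + 1 from by ring]
    rfl

lemma pv_B_eq (enemies : List (List (String × String))) :
    number_enemies_py_alt enemies
      = (PySem.List.enumerate enemies).map (pvBodyB (enemies.map pvName)) := by
  rw [pv_alt_unfold]
  apply List.map_congr_left
  intro p hp
  rcases (PySem.List.mem_enumerate_iff _ _ _).1 hp with ⟨k, hk, hpe⟩
  subst hpe
  simpa using pv_assign_getD enemies k hk

-- ===== VERDICT (by name: the statement is the Claim_ definition above) =====
theorem number_enemies_py_spec : Claim_equal_number_enemies_py := by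
  intro enemies _
  show number_enemies_py enemies = number_enemies_py_alt enemies
  rw [pv_A_eq, pv_B_eq]
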